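-- pv_equiv track=rewrite | github.com/code-for-paper/topicModeling | oip_topicGPT/v4_statistic.py | clean_duplicate
-- ===== SOURCE A (Python) =====
-- def clean_duplicate(words: set[str]) -> set[str]:
--     # Some words in words may be prefixes of other words, keep only the shortest prefix, delete others
--     words_list = sorted(words, key=len)
--     result = set()
--
--     for word in words_list:
--         # Check if current word starts with any already added word as prefix
--         is_duplicate = False
--         for existing in result:
--             if word.startswith(existing):  # Current word has existing as prefix
--                 is_duplicate = True
--                 break
--
--         if not is_duplicate:
--             result.add(word)
--
--     return result
-- ===== SOURCE B (Python) =====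
-- def clean_duplicate(words: set[str]) -> set[str]:
--     # Keep a word only if none of its proper prefixes is an already-kept word:
--     # membership of each prefix is tested directly in the kept set, removing
--     # the scan over all previously kept words.
--     kept = set()
--     for word in sorted(words, key=len):
--         if not any(word[:i] in kept for i in range(len(word))):
--             kept.add(word)
--     return kept
-- ===== Notes on version B (the rewrite author's own statement) =====
-- stated objective: alternative
-- what changed: Instead of scanning every already-kept word and testing startswith, B tests each proper prefix of the current word for membership in the kept set, so the inner pass over the result set disappears (traded for a pass over the word's prefixes).
import Mathlib
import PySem

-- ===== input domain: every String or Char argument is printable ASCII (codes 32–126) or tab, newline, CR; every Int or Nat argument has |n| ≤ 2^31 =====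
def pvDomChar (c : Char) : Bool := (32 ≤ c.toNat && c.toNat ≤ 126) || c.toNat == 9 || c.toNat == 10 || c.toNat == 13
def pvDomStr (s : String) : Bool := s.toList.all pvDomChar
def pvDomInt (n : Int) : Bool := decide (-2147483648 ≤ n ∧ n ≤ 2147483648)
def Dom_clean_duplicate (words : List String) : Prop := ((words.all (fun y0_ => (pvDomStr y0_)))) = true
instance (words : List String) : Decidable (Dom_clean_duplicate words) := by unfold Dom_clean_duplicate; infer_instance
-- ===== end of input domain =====

-- B replaces A's inner scan over the kept set by membership tests of the word's proper prefixes (alternative algorithm, same result).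

-- ===== PORT A =====
def clean_duplicate (words : List String) : List String :=
  let words_list := PySem.List.sorted words (fun w => PySem.Str.len w) false
  words_list.foldl
    (fun result word =>
      let is_duplicate := result.any (fun existing => PySem.Str.startswith word existing)
      if !is_duplicate then PySem.Set.add result word else result)
    PySem.Set.empty

-- ===== PORT B =====
def cdHasPrefixIn (kept : PySem.Set String) (word : String) : Bool :=
  (PySem.List.pyRange 0 (PySem.Str.len word) 1).any
    (fun i => PySem.Set.contains kept (PySem.Str.slice word none (some i)))

def cdInsertLoop (kept : PySem.Set String) : List String → List String
  | [] => kept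
  | w :: ws =>
      if cdHasPrefixIn kept w then cdInsertLoop kept ws
      else cdInsertLoop (PySem.Set.add kept w) ws

def clean_duplicate_alt (words : List String) : List String :=
  cdInsertLoop PySem.Set.empty (PySem.List.sorted words (fun w => PySem.Str.len w) false)

-- ===== PRECONDITION & SPEC =====
def Spec_clean_duplicate (words : List String) (out : List String) : Prop := out = clean_duplicate_alt words
instance (words : List String) (out : List String) : Decidable (Spec_clean_duplicate words out) := by unfold Spec_clean_duplicate; infer_instance

-- ===== CLAIM (what is proved, stated in full; the proofs are below) =====
def Claim_equal_clean_duplicate : Prop := ∀ (words : List String), Dom_clean_duplicate words → Spec_clean_duplicate words (clean_duplicate words)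

-- ===== LEMMAS AND PROOFS =====

lemma cdHasPrefixIn_iff (s : PySem.Set String) (w : String) :
    cdHasPrefixIn s w = true ↔
      ∃ e ∈ s, e.toList <+: w.toList ∧ e.toList.length < w.toList.length := by
  unfold cdHasPrefixIn
  rw [List.any_eq_true]
  constructor
  · rintro ⟨i, hi, hc⟩
    obtain ⟨h0, hlt⟩ := PySem.List.mem_pyRange_one.mp hi
    have hlen : PySem.Str.len w = (w.toList.length : Int) := by
      simp [PySem.Str.len_eq]
    have ht : (PySem.Str.slice w none (some i)).toList = w.toList.take i.toNat := by
      rw [PySem.Str.toList_slice, PySem.Chars.slice_eq_listSlice, PySem.List.slice_to _ h0]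
    refine ⟨_, (PySem.Set.contains_iff _ _).mp hc, ?_, ?_⟩
    · rw [ht]; exact List.take_prefix _ _
    · rw [ht, List.length_take]
      omega
  · rintro ⟨e, he, hpre, hlt⟩
    refine ⟨(e.toList.length : Int), ?_, ?_⟩
    · rw [PySem.List.mem_pyRange_one]
      have hlen : PySem.Str.len w = (w.toList.length : Int) := by
        simp [PySem.Str.len_eq]
      omega
    · rw [PySem.Set.contains_iff]
      have ht : (PySem.Str.slice w none (some ((e.toList.length : Nat) : Int))).toList
          = w.toList.take e.toList.length := by
        rw [PySem.Str.toList_slice, PySem.Chars.slice_eq_listSlice,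
          PySem.List.slice_to _ (by positivity)]
        simp
      have : PySem.Str.slice w none (some ((e.toList.length : Nat) : Int)) = e := by
        rw [← String.toList_inj, ht, ← List.prefix_iff_eq_take.mp hpre]
      rwa [this]

lemma any_startswith_iff (s : PySem.Set String) (w : String) :
    (s.any (fun e => PySem.Str.startswith w e)) = true ↔
      ∃ e ∈ s, e.toList <+: w.toList := by
  simp [List.any_eq_true, PySem.Str.startswith_eq, PySem.Chars.startswith_iff]

lemma step_eq (s : PySem.Set String) (w : String) :
    (let is_duplicate := s.any (fun existing => PySem.Str.startswith w existing)
     if !is_duplicate then PySem.Set.add s w else s)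
    = (if cdHasPrefixIn s w then s else PySem.Set.add s w) := by
  show (if !(List.any s fun existing => PySem.Str.startswith w existing)
        then PySem.Set.add s w else s) = _
  by_cases hB : cdHasPrefixIn s w = true
  · obtain ⟨e, he, hpre, _⟩ := (cdHasPrefixIn_iff s w).mp hB
    have hA : (List.any s fun existing => PySem.Str.startswith w existing) = true :=
      (any_startswith_iff s w).mpr ⟨e, he, hpre⟩
    rw [hA, hB]; rfl
  · have hB' : cdHasPrefixIn s w = false := Bool.not_eq_true _ ▸ hB
    by_cases hA : (List.any s fun existing => PySem.Str.startswith w existing) = true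
    · obtain ⟨e, he, hpre⟩ := (any_startswith_iff s w).mp hA
      have hnlt : ¬ e.toList.length < w.toList.length :=
        fun h => hB ((cdHasPrefixIn_iff s w).mpr ⟨e, he, hpre, h⟩)
      have hle : e.toList.length ≤ w.toList.length := hpre.length_le
      have heq : e.toList = w.toList := hpre.eq_of_length (by omega)
      have hw : w ∈ s := String.toList_inj.mp heq ▸ he
      rw [hA, hB', PySem.Set.add_of_mem hw]; rfl
    · have hA' : (List.any s fun existing => PySem.Str.startswith w existing) = false :=
        Bool.not_eq_true _ ▸ hA
      rw [hA', hB']; rfl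

lemma loop_eq (l : List String) (s : PySem.Set String) :
    l.foldl
      (fun result word =>
        let is_duplicate := result.any (fun existing => PySem.Str.startswith word existing)
        if !is_duplicate then PySem.Set.add result word else result) s
    = cdInsertLoop s l := by
  induction l generalizing s with
  | nil => rfl
  | cons w ws ih =>
      rw [List.foldl_cons, step_eq s w]
      show _ = cdInsertLoop s (w :: ws)
      rw [cdInsertLoop]
      split_ifs <;> exact ih _

-- ===== VERDICT (by name: the statement is the Claim_ definition above) =====
theorem clean_duplicate_spec : Claim_equal_clean_duplicate := by
  intro words _
  unfold Spec_clean_duplicate clean_duplicate clean_duplicate_alt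
  exact loop_eq _ _
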